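-- pv_equiv track=rewrite | github.com/morleytj/aoc2023 | day1.py | find_numnums
-- ===== SOURCE A (Python) =====
-- def find_numnums(line):
--     first = "-1"
--     last = "-1"
--     f_index = -1
--     l_index = -1
--     firstdigitenc = False
--     index = 0
--     for char in line:
--         if char in ["0","1","2","3","4","5","6","7","8","9"]:
--             if firstdigitenc:
--                 last = char
--                 l_index=index
--             else:
--                 first = char
--                 last = char
--                 f_index=index
--                 l_index=index
--                 firstdigitenc=True
--         index+=1
--     return (first, last, f_index, l_index)
-- ===== SOURCE B (Python) =====
-- def find_numnums(line):
--     digs = [(i, c) for i, c in enumerate(line) if c in "0123456789"]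
--     if not digs:
--         return ("-1", "-1", -1, -1)
--     fi, fc = digs[0]
--     li, lc = digs[-1]
--     return (fc, lc, fi, li)
-- ===== Notes on version B (the rewrite author's own statement) =====
-- stated objective: simpler
-- what changed: Replaces the flag-driven stateful loop with one comprehension collecting (index, digit) pairs and reading off the first and last element.
import Mathlib
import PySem

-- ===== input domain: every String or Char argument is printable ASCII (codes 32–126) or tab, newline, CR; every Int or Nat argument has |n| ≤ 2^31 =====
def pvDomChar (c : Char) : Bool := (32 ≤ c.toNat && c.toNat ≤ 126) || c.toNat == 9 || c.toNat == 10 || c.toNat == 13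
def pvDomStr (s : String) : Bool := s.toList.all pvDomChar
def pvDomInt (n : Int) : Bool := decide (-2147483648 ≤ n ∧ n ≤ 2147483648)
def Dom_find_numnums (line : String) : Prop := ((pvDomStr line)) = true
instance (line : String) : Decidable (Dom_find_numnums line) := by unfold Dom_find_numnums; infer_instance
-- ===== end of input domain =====

-- B replaces A's flag-driven single pass with a comprehension of (index, digit) pairs,
-- reading the answer off its first and last element (objective: simpler).


-- ===== PORT A =====
-- the Python list ["0",…,"9"] of one-char strings; iterating a string yields chars
def pvDigits : List Char := ['0','1','2','3','4','5','6','7','8','9']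

def pvStepA (st : String × String × Int × Int × Bool × Int) (ch : Char) :
    String × String × Int × Int × Bool × Int :=
  let (first, last, f_index, l_index, firstdigitenc, index) := st
  if ch ∈ pvDigits then
    if firstdigitenc then
      (first, String.ofList [ch], f_index, index, firstdigitenc, index + 1)
    else
      (String.ofList [ch], String.ofList [ch], index, index, true, index + 1)
  else
    (first, last, f_index, l_index, firstdigitenc, index + 1)

def find_numnums (line : String) : String × String × Int × Int :=
  let st := line.toList.foldl pvStepA ("-1", "-1", -1, -1, false, 0)
  (st.1, st.2.1, st.2.2.1, st.2.2.2.1)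

-- ===== PORT B =====
def find_numnums_alt (line : String) : String × String × Int × Int :=
  let digs := (PySem.List.enumerate line.toList).filter (fun p => p.2 ∈ "0123456789".toList)
  match digs with
  | [] => ("-1", "-1", -1, -1)
  | (fi, fc) :: rest =>
    let (li, lc) := rest.getLastD (fi, fc)
    (String.ofList [fc], String.ofList [lc], fi, li)

-- ===== PRECONDITION & SPEC =====
def Spec_find_numnums (line : String) (out : String × String × Int × Int) : Prop := out = find_numnums_alt line
instance (line : String) (out : String × String × Int × Int) : Decidable (Spec_find_numnums line out) := by unfold Spec_find_numnums; infer_instance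

-- ===== CLAIM (what is proved, stated in full; the proofs are below) =====
def Claim_equal_find_numnums : Prop := ∀ (line : String), Dom_find_numnums line → Spec_find_numnums line (find_numnums line)

-- ===== LEMMAS AND PROOFS =====

-- the digit positions of xs when the first char has index i
def pvDf (i : Int) : List Char → List (Int × Char)
  | [] => []
  | x :: xs => if x ∈ pvDigits then (i, x) :: pvDf (i + 1) xs else pvDf (i + 1) xs

def pvProj (st : String × String × Int × Int × Bool × Int) : String × String × Int × Int :=
  (st.1, st.2.1, st.2.2.1, st.2.2.2.1)

theorem pvFoldTrue (xs : List Char) : ∀ (F L : String) (fi li i : Int),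
    pvProj (xs.foldl pvStepA (F, L, fi, li, true, i)) =
      match (pvDf i xs).getLast? with
      | none => (F, L, fi, li)
      | some (j, c) => (F, String.ofList [c], fi, j) := by
  induction xs with
  | nil => intro F L fi li i; simp [pvDf, pvProj]
  | cons x xs ih =>
    intro F L fi li i
    by_cases h : x ∈ pvDigits
    · simp only [List.foldl_cons, pvStepA, pvDf, h, if_pos, if_true]
      rw [ih]
      rw [List.getLast?_cons]
      rcases hl : (pvDf (i + 1) xs).getLast? with _ | ⟨j, c⟩ <;>
        simp [List.getLastD_eq_getLast?, hl]
    · simp only [List.foldl_cons, pvStepA, pvDf, h, if_false]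
      exact ih F L fi li (i + 1)

theorem pvFoldFalse (xs : List Char) : ∀ (i : Int),
    pvProj (xs.foldl pvStepA ("-1", "-1", -1, -1, false, i)) =
      match pvDf i xs with
      | [] => ("-1", "-1", -1, -1)
      | (fi, fc) :: rest =>
        (String.ofList [fc], String.ofList [(rest.getLastD (fi, fc)).2], fi, (rest.getLastD (fi, fc)).1) := by
  induction xs with
  | nil => intro i; simp [pvDf, pvProj]
  | cons x xs ih =>
    intro i
    by_cases h : x ∈ pvDigits
    · simp only [List.foldl_cons, pvStepA, h, if_pos, Bool.false_eq_true, if_false, pvDf]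
      rw [pvFoldTrue]
      rcases hl : (pvDf (i + 1) xs).getLast? with _ | ⟨j, c⟩ <;>
        simp [List.getLastD_eq_getLast?, hl]
    · simp only [List.foldl_cons, pvStepA, h, if_false, pvDf]
      exact ih (i + 1)

theorem pvEnumFilter (xs : List Char) : ∀ (i : Int),
    (PySem.List.enumerate xs i).filter (fun p => p.2 ∈ "0123456789".toList) = pvDf i xs := by
  have hs : "0123456789".toList = pvDigits := by decide
  induction xs with
  | nil => intro i; simp [PySem.List.enumerate_nil, pvDf]
  | cons x xs ih =>
    intro i
    rw [PySem.List.enumerate_cons, List.filter_cons]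
    simp only [hs] at ih ⊢
    by_cases h : x ∈ pvDigits
    · simp [pvDf, h, ih]
    · simp [pvDf, h, ih]

-- ===== VERDICT (by name: the statement is the Claim_ definition above) =====
theorem find_numnums_spec : Claim_equal_find_numnums := by
  intro line _
  unfold Spec_find_numnums find_numnums find_numnums_alt
  rw [show (PySem.List.enumerate line.toList : List (Int × Char)) = PySem.List.enumerate line.toList 0 from rfl]
  rw [pvEnumFilter]
  have h := pvFoldFalse line.toList 0
  simp only [pvProj] at h
  rw [h]
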